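-- pv_equiv track=rewrite | github.com/greenblat/vhdl2v | llbin/extractVerilogSetup.py | removeRemarks
-- ===== SOURCE A (Python) =====
-- def removeRemarks(Wrds):
--     if '/*' not in Wrds: return True,Wrds
--     if '*/' not in Wrds:
--         return False,Wrds
--     ind0 = Wrds.index('/*')
--     ind1 = Wrds.index('*/')
--     Res = Wrds[:ind0]+Wrds[ind1+1:]
--     return removeRemarks(Res)
-- ===== SOURCE B (Python) =====
-- def removeRemarks(Wrds):
--     # single linear pass: keep tokens outside /* ... */ blocks; on an
--     # unterminated /* return False with the kept prefix plus the rest as-is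
--     res = []
--     i = 0
--     n = len(Wrds)
--     while i < n:
--         w = Wrds[i]
--         if w == '/*':
--             j = i + 1
--             while j < n and Wrds[j] != '*/':
--                 j += 1
--             if j == n:
--                 return False, res + Wrds[i:]
--             i = j + 1
--         else:
--             res.append(w)
--             i += 1
--     return True, res
-- ===== Notes on version B (the rewrite author's own statement) =====
-- stated objective: alternative
-- what changed: replaced A's repeated index/slice/concatenate recursion (rescanning the list from the start after every removed comment) with one linear left-to-right pass that keeps tokens outside /* ... */ and skips past each closing */
-- crash fix: On inputs where a '*/' occurring outside any comment is followed later by a '/*', A recurses forever and raises RecursionError; B returns the natural linear-scan result (e.g. (False, ['*/','/*']) on ['*/','/*']). — e.g. on removeRemarks(["*/", "/*"]): A raises RecursionError, B returns (false, ["*/", "/*"])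
import Mathlib
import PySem

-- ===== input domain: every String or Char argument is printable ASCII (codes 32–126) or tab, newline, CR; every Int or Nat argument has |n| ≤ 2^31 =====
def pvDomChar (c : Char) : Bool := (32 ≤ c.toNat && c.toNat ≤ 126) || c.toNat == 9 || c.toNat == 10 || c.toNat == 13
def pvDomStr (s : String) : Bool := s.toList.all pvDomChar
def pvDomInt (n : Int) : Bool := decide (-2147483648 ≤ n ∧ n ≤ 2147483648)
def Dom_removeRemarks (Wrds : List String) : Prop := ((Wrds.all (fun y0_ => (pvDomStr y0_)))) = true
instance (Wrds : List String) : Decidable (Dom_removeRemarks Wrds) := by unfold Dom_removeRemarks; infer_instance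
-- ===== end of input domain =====

-- B replaces A's index/slice/recurse loop with a single left-to-right pass; on inputs
-- where A recurses forever (stray '*/' followed by '/*'), excluded by Pre_, B still returns.

-- ===== PORT A =====
-- A's recursion does not terminate on all inputs (see Pre_ below), so the port carries a
-- fuel counter that only totalizes it: under Pre_ every recursive step removes at least two
-- tokens, so `length + 1` units of fuel are never exhausted.
def removeRemarksFuel : Nat → List String → Bool × List String
  | 0, Wrds => (false, Wrds)
  | fuel+1, Wrds =>
    if Wrds.contains "/*" = false then (true, Wrds)            -- if '/*' not in Wrds
    else if Wrds.contains "*/" = false then (false, Wrds)      -- if '*/' not in Wrds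
    else
      let ind0 := (PySem.List.index? Wrds "/*").getD 0         -- Wrds.index('/*') (present, so getD unused)
      let ind1 := (PySem.List.index? Wrds "*/").getD 0         -- Wrds.index('*/')
      removeRemarksFuel fuel
        (PySem.List.slice Wrds none (some (ind0 : Int)) ++
         PySem.List.slice Wrds (some ((ind1 : Int) + 1)) none) -- Wrds[:ind0] + Wrds[ind1+1:]

def removeRemarks (Wrds : List String) : Bool × List String :=
  removeRemarksFuel (Wrds.length + 1) Wrds

-- ===== PORT B =====
-- inner `while j < n and Wrds[j] != '*/'` loop: skip up to and past the next '*/'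
def rrFindClose : List String → Option (List String)
  | [] => none
  | w :: ws => if w = "*/" then some ws else rrFindClose ws

theorem rrFindClose_lt : ∀ (ws rest : List String), rrFindClose ws = some rest → rest.length < ws.length
  | [], _, h => by simp [rrFindClose] at h
  | w :: ws, rest, h => by
    by_cases hw : w = "*/"
    · simp [rrFindClose, hw] at h; simp [← h]
    · simp [rrFindClose, hw] at h
      have := rrFindClose_lt ws rest h
      simp; omega

-- outer `while i < n` loop over the remaining suffix, with the accumulated kept tokens
def rrGo (res : List String) : List String → Bool × List String
  | [] => (true, res)
  | w :: ws =>
    if w = "/*" then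
      match h : rrFindClose ws with
      | none => (false, res ++ w :: ws)
      | some rest => rrGo res rest
    else rrGo (res ++ [w]) ws
termination_by l => l.length
decreasing_by
  · have := rrFindClose_lt ws rest h; simp only [List.length_cons]; omega
  · simp

def removeRemarks_alt (Wrds : List String) : Bool × List String := rrGo [] Wrds

-- ===== PRECONDITION & SPEC =====
-- Pre_ excludes exactly the inputs where a '*/' token occurring outside any comment is
-- followed later by a '/*': there A's recursion never reaches a base case and Python
-- raises RecursionError, so A returns no value.
def rrPreScan : Bool → List String → Bool
  | _, [] => true
  | inside, w :: ws =>
    if w = "/*" then rrPreScan true ws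
    else if w = "*/" then
      if inside then rrPreScan false ws else !ws.contains "/*"
    else rrPreScan inside ws

def Pre_removeRemarks (Wrds : List String) : Prop := rrPreScan false Wrds = true
instance (Wrds : List String) : Decidable (Pre_removeRemarks Wrds) := by
  unfold Pre_removeRemarks; infer_instance

def pvWitness_removeRemarks : List String := ["a", "/*", "b", "*/", "c", "*/"]

-- On inputs with a stray '*/' (outside any comment) followed by a '/*', A raises
-- RecursionError; B returns the linear-scan result, keeping the unmatched tokens.
def Raises_removeRemarks (Wrds : List String) : Prop := rrPreScan false Wrds = false
instance (Wrds : List String) : Decidable (Raises_removeRemarks Wrds) := by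
  unfold Raises_removeRemarks; infer_instance
def pvRaiseWitness_removeRemarks : List String := ["*/", "/*"]
def pvRaiseWitnessOut_removeRemarks : Bool × List String := (false, ["*/", "/*"])

def Spec_removeRemarks (Wrds : List String) (out : Bool × List String) : Prop := out = removeRemarks_alt Wrds
instance (Wrds : List String) (out : Bool × List String) : Decidable (Spec_removeRemarks Wrds out) := by unfold Spec_removeRemarks; infer_instance

-- ===== CLAIM (what is proved, stated in full; the proofs are below) =====
def Claim_equal_removeRemarks : Prop := ∀ (Wrds : List String), Dom_removeRemarks Wrds → Pre_removeRemarks Wrds → Spec_removeRemarks Wrds (removeRemarks Wrds)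
def Claim_raises_removeRemarks : Prop := (∀ (Wrds : List String), Dom_removeRemarks Wrds → Raises_removeRemarks Wrds → ¬ Pre_removeRemarks Wrds) ∧ (Dom_removeRemarks (pvRaiseWitness_removeRemarks) ∧ Raises_removeRemarks (pvRaiseWitness_removeRemarks) ∧ removeRemarks_alt (pvRaiseWitness_removeRemarks) = pvRaiseWitnessOut_removeRemarks)

-- ===== LEMMAS AND PROOFS =====

theorem rrGo_noSlash : ∀ (R C : List String), "/*" ∉ R → rrGo C R = (true, C ++ R)
  | [], C, _ => by simp [rrGo]
  | w :: ws, C, h => by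
    have hw : w ≠ "/*" := fun e => h (by simp [e])
    rw [rrGo]
    simp only [if_neg hw]
    rw [rrGo_noSlash ws (C ++ [w]) (fun m => h (by simp [m]))]
    simp

theorem rrFindClose_none : ∀ (ws : List String), "*/" ∉ ws → rrFindClose ws = none
  | [], _ => rfl
  | w :: ws, h => by
    have hw : w ≠ "*/" := fun e => h (by simp [e])
    rw [rrFindClose]
    simp only [if_neg hw]
    exact rrFindClose_none ws (fun m => h (by simp [m]))

theorem rrGo_noClose : ∀ (R C : List String), "/*" ∈ R → "*/" ∉ R → rrGo C R = (false, C ++ R)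
  | [], C, h1, _ => by simp at h1
  | w :: ws, C, h1, h2 => by
    by_cases hw : w = "/*"
    · rw [rrGo]
      simp only [if_pos hw]
      rw [rrFindClose_none ws (fun m => h2 (by simp [m]))]
    · rw [rrGo]
      simp only [if_neg hw]
      have h1' : "/*" ∈ ws := by rcases List.mem_cons.mp h1 with e | e; exact absurd e.symm hw; exact e
      rw [rrGo_noClose ws (C ++ [w]) h1' (fun m => h2 (by simp [m]))]
      simp

theorem rrFindClose_eq : ∀ (M S : List String), "*/" ∉ M → rrFindClose (M ++ "*/" :: S) = some S
  | [], S, _ => by simp [rrFindClose]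
  | m :: M, S, h => by
    have hm : m ≠ "*/" := fun e => h (by simp [e])
    rw [List.cons_append, rrFindClose]
    simp only [if_neg hm]
    exact rrFindClose_eq M S (fun x => h (by simp [x]))

theorem rrGo_clean : ∀ (P C R : List String), "/*" ∉ P → "*/" ∉ P → rrGo C (P ++ R) = rrGo (C ++ P) R
  | [], C, R, _, _ => by simp
  | p :: P, C, R, h1, h2 => by
    have hp : p ≠ "/*" := fun e => h1 (by simp [e])
    rw [List.cons_append, rrGo]
    simp only [if_neg hp]
    rw [rrGo_clean P (C ++ [p]) R (fun m => h1 (by simp [m])) (fun m => h2 (by simp [m]))]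
    simp

theorem rrPreScan_clean : ∀ (P R : List String) (b : Bool), "/*" ∉ P → "*/" ∉ P →
    rrPreScan b (P ++ R) = rrPreScan b R
  | [], R, b, _, _ => rfl
  | p :: P, R, b, h1, h2 => by
    have hp1 : p ≠ "/*" := fun e => h1 (by simp [e])
    have hp2 : p ≠ "*/" := fun e => h2 (by simp [e])
    rw [List.cons_append, rrPreScan]
    simp only [if_neg hp1, if_neg hp2]
    exact rrPreScan_clean P R b (fun m => h1 (by simp [m])) (fun m => h2 (by simp [m]))

theorem rrPreScan_inside : ∀ (M S : List String), "*/" ∉ M →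
    rrPreScan true (M ++ "*/" :: S) = rrPreScan false S
  | [], S, _ => by rw [List.nil_append, rrPreScan]; simp
  | m :: M, S, h => by
    have hm : m ≠ "*/" := fun e => h (by simp [e])
    rw [List.cons_append, rrPreScan]
    have ih := rrPreScan_inside M S (fun x => h (by simp [x]))
    by_cases hm1 : m = "/*"
    · rw [if_pos hm1]; exact ih
    · rw [if_neg hm1, if_neg hm]; exact ih

theorem rrPreScan_stray : ∀ (P T : List String), rrPreScan false (P ++ "*/" :: T) = true →
    "/*" ∈ T → "*/" ∉ P → "/*" ∉ P → False
  | [], T, h, hT, _, _ => by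
    rw [List.nil_append, rrPreScan] at h
    simp only [String.reduceEq, if_false] at h
    exact absurd hT (by simpa using h)
  | p :: P, T, h, hT, h2, h1 => by
    have hp1 : p ≠ "/*" := fun e => h1 (by simp [e])
    have hp2 : p ≠ "*/" := fun e => h2 (by simp [e])
    rw [List.cons_append, rrPreScan] at h
    simp only [if_neg hp1, if_neg hp2] at h
    exact rrPreScan_stray P T h hT (fun m => h2 (by simp [m])) (fun m => h1 (by simp [m]))

-- first-occurrence split
theorem rr_split : ∀ (R : List String) (v : String), v ∈ R → ∃ P T, R = P ++ v :: T ∧ v ∉ P := by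
  intro R v h
  have h' : PySem.List.index? R v ≠ none := by
    rw [Ne, PySem.List.index?_eq_none_iff]; simpa using h
  obtain ⟨k, hk⟩ := Option.ne_none_iff_exists'.mp h'
  obtain ⟨P, T, hPT, _, hv⟩ := (PySem.List.index?_eq_some_iff R v k).mp hk
  exact ⟨P, T, hPT, hv⟩

theorem main_lemma : ∀ (f : Nat) (C R : List String), (C ++ R).length + 1 ≤ f →
    "/*" ∉ C → "*/" ∉ C → rrPreScan false R = true →
    removeRemarksFuel f (C ++ R) = rrGo C R := by
  intro f
  induction f with
  | zero => intro C R h _ _ _; omega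
  | succ f ih =>
    intro C R hlen hC1 hC2 hpre
    by_cases h1 : "/*" ∈ R
    · by_cases h2 : "*/" ∈ R
      · obtain ⟨P, T, rfl, hP1⟩ := rr_split R "/*" h1
        have hP2 : "*/" ∉ P := by
          intro hmem
          obtain ⟨P1, P2, rfl, hQ⟩ := rr_split P "*/" hmem
          have hnP1 : "/*" ∉ P1 := fun m => hP1 (by simp [m])
          refine rrPreScan_stray P1 (P2 ++ "/*" :: T) ?_ (by simp) hQ hnP1
          simpa using hpre
        have hT : "*/" ∈ T := by
          rcases List.mem_append.mp h2 with hm | hm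
          · exact absurd hm hP2
          · rcases List.mem_cons.mp hm with e | e
            · exact absurd e (by decide)
            · exact e
        obtain ⟨M, S, rfl, hM⟩ := rr_split T "*/" hT
        have hL1 : "/*" ∉ C ++ P := by simp [hC1, hP1]
        have hL2 : "*/" ∉ C ++ P := by simp [hC2, hP2]
        have hpreS : rrPreScan false S = true := by
          rw [rrPreScan_clean P _ false hP1 hP2, rrPreScan] at hpre
          simp only [if_pos] at hpre
          rwa [rrPreScan_inside M S hM] at hpre
        have hassoc : C ++ (P ++ "/*" :: (M ++ "*/" :: S)) =
            (C ++ P) ++ "/*" :: (M ++ "*/" :: S) := by simp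
        have hc0 : ((C ++ P) ++ "/*" :: (M ++ "*/" :: S)).contains "/*" = true := by simp
        have hc1 : ((C ++ P) ++ "/*" :: (M ++ "*/" :: S)).contains "*/" = true := by simp
        have hi0 : PySem.List.index? ((C ++ P) ++ "/*" :: (M ++ "*/" :: S)) "/*"
            = some (C ++ P).length :=
          (PySem.List.index?_eq_some_iff _ _ _).mpr ⟨C ++ P, _, rfl, rfl, hL1⟩
        have hi1 : PySem.List.index? ((C ++ P) ++ "/*" :: (M ++ "*/" :: S)) "*/"
            = some ((C ++ P) ++ "/*" :: M).length := by
          have he : (C ++ P) ++ "/*" :: (M ++ "*/" :: S) = ((C ++ P) ++ "/*" :: M) ++ "*/" :: S := by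
            simp
          rw [he]
          exact (PySem.List.index?_eq_some_iff _ _ _).mpr
            ⟨(C ++ P) ++ "/*" :: M, S, rfl, rfl, by simp [hM]; exact ⟨hC2, hP2⟩⟩
        have htake : ((C ++ P) ++ "/*" :: (M ++ "*/" :: S)).take (C ++ P).length = C ++ P :=
          List.take_left
        have hdrop : ((C ++ P) ++ "/*" :: (M ++ "*/" :: S)).drop
            (((C ++ P) ++ "/*" :: M).length + 1) = S := by
          have he : (C ++ P) ++ "/*" :: (M ++ "*/" :: S)
              = (((C ++ P) ++ "/*" :: M) ++ ["*/"]) ++ S := by simp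
          have hl : ((((C ++ P) ++ "/*" :: M) ++ ["*/"])).length
              = ((C ++ P) ++ "/*" :: M).length + 1 := by simp; omega
          rw [he, ← hl, List.drop_left]
        rw [hassoc, removeRemarksFuel]
        simp only [hc0, hc1, hi0, hi1, Option.getD_some, Bool.true_eq_false, if_false]
        have hcast : ((((C ++ P) ++ "/*" :: M).length : Int) + 1)
            = (((((C ++ P) ++ "/*" :: M).length + 1 : Nat)) : Int) := by push_cast; ring
        rw [PySem.List.slice_to_natCast, hcast, PySem.List.slice_from_natCast, htake, hdrop]
        have hstep := ih (C ++ P) S (by simp at hlen ⊢; omega) hL1 hL2 hpreS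
        rw [hstep, rrGo_clean P C _ hP1 hP2, rrGo]
        simp only [if_pos]
        rw [rrFindClose_eq M S hM]
      · rw [removeRemarksFuel, rrGo_noClose R C h1 h2]
        simp [h1, hC2, h2]
    · rw [removeRemarksFuel, rrGo_noSlash R C h1]
      simp [hC1, h1]

-- ===== VERDICT (by name: the statement is the Claim_ definition above) =====
theorem removeRemarks_spec : Claim_equal_removeRemarks := by
  intro Wrds _ hpre
  unfold Spec_removeRemarks removeRemarks removeRemarks_alt
  simpa using main_lemma (Wrds.length + 1) [] Wrds (by simp) (by simp) (by simp) hpre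

theorem removeRemarks_raises : Claim_raises_removeRemarks := by
  unfold Claim_raises_removeRemarks
  exact ⟨by intro W _ h hp; rw [Raises_removeRemarks] at h; rw [Pre_removeRemarks] at hp; simp [h] at hp,
         ⟨by decide, by decide, by simp [removeRemarks_alt, pvRaiseWitness_removeRemarks,
            pvRaiseWitnessOut_removeRemarks, rrGo, rrFindClose]⟩⟩

-- self-check of the crash-fix block: the raise witness indeed falls outside Pre_
theorem removeRemarks_raises_witness_ok : ¬ Pre_removeRemarks pvRaiseWitness_removeRemarks :=
  removeRemarks_raises.1 pvRaiseWitness_removeRemarks (by decide) removeRemarks_raises.2.2.1
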